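-- pv_equiv track=rewrite | github.com/Bogdan1232-ad/podgotovka | justlessons/200125/ex15-1859.py | f
-- ===== SOURCE A (Python) =====
-- def f(A):
--     for x in range(0, 10000):
--         for y in range(0, 10000):
--             f = (2 * x + y != 70)\
--                 or (x < y) or (A < x)
--             if not(f):
--                 return False
--     return True
-- ===== SOURCE B (Python) =====
-- def f(A):
--     # 2x+y=70 with 0<=y<=x and x<=A has a solution iff 24<=x<=35 for some x<=A,
--     # i.e. iff A >= 24; f returns True when NO such pair exists.
--     return A < 24
-- ===== Notes on version B (the rewrite author's own statement) =====
-- stated objective: faster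
-- what changed: Replaced the 10000x10000 brute-force search for a pair (x,y) with 2x+y=70, y<=x, x<=A by the algebraic closed form: such a pair exists iff A>=24, so f returns A<24.
import Mathlib
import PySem

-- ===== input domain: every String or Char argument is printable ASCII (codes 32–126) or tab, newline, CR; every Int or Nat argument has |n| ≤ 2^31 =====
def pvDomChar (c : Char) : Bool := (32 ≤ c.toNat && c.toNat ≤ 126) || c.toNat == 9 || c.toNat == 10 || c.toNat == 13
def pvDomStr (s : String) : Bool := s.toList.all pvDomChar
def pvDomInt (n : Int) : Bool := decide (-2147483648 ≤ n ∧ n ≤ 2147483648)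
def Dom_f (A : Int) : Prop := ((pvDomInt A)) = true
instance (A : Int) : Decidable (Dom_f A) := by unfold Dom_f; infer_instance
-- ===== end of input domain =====

-- B replaces A's 10000×10000 brute-force search for (x,y) with 2x+y=70, y≤x, x≤A
-- by the closed form A < 24 (faster: O(1) vs O(N²)).

-- ===== PORT A =====
-- inner loop over y: 'some false' = early `return False`, none = loop finished
def fInner (A x : Int) : List Int → Option Bool
  | [] => none
  | y :: ys =>
      if !((decide (2 * x + y ≠ 70)) || (decide (x < y)) || (decide (A < x))) then
        some false
      else fInner A x ys

-- outer loop over x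
def fOuter (A : Int) : List Int → Bool
  | [] => true
  | x :: xs =>
      match fInner A x (PySem.List.pyRange 0 10000 1) with
      | some b => b
      | none => fOuter A xs

def f (A : Int) : Bool := fOuter A (PySem.List.pyRange 0 10000 1)

-- ===== PORT B =====
def f_alt (A : Int) : Bool := decide (A < 24)

-- ===== PRECONDITION & SPEC =====
def Spec_f (A : Int) (out : Bool) : Prop := out = f_alt A
instance (A : Int) (out : Bool) : Decidable (Spec_f A out) := by unfold Spec_f; infer_instance

-- ===== CLAIM (what is proved, stated in full; the proofs are below) =====
def Claim_equal_f : Prop := ∀ (A : Int), Dom_f A → Spec_f A (f A)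

-- ===== LEMMAS AND PROOFS =====

def hitP (A x y : Int) : Bool :=
  decide (2 * x + y = 70) && decide (y ≤ x) && decide (x ≤ A)

theorem cond_eq (A x y : Int) :
    (!((decide (2 * x + y ≠ 70)) || (decide (x < y)) || (decide (A < x)))) = hitP A x y := by
  by_cases h1 : 2 * x + y = 70 <;> by_cases h2 : x < y <;> by_cases h3 : A < x <;>
    simp_all [hitP]

theorem fInner_eq (A x : Int) (ys : List Int) :
    fInner A x ys = if ys.any (hitP A x) then some false else none := by
  induction ys with
  | nil => simp [fInner]
  | cons y ys ih =>
      rw [fInner, cond_eq, List.any_cons, ih]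
      by_cases h : hitP A x y = true <;> simp [h]

theorem fOuter_eq (A : Int) (xs : List Int) :
    fOuter A xs = !xs.any (fun x => (PySem.List.pyRange 0 10000 1).any (hitP A x)) := by
  induction xs with
  | nil => simp [fOuter]
  | cons x xs ih =>
      simp only [fOuter, fInner_eq, List.any_cons]
      by_cases h : (PySem.List.pyRange 0 10000 1).any (hitP A x) <;> simp [h, ih]

theorem exists_hit_iff (A : Int) :
    ((PySem.List.pyRange 0 10000 1).any
      (fun x => (PySem.List.pyRange 0 10000 1).any (hitP A x))) = decide (24 ≤ A) := by
  by_cases h : 24 ≤ A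
  · simp only [h, decide_true, List.any_eq_true]
    refine ⟨24, ?_, 22, ?_, ?_⟩
    · rw [PySem.List.mem_pyRange_one]; omega
    · rw [PySem.List.mem_pyRange_one]; omega
    · simp [hitP]; omega
  · simp only [h, decide_false, List.any_eq_false]
    intro x hx
    simp only [Bool.not_eq_true, List.any_eq_false]
    intro y hy
    rw [PySem.List.mem_pyRange_one] at hx hy
    rw [Bool.eq_false_iff]
    intro hhit
    simp only [hitP, Bool.and_eq_true, decide_eq_true_eq] at hhit
    omega

-- ===== VERDICT (by name: the statement is the Claim_ definition above) =====
theorem f_spec : Claim_equal_f := by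
  intro A _
  show f A = f_alt A
  rw [f, fOuter_eq, exists_hit_iff, f_alt]
  by_cases h : 24 ≤ A <;> simp [h] <;> omega
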